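-- pv_equiv track=rewrite | github.com/hghyhghy/Codechef-Coding-Ninja | Desktop/DSA/T83/smallestsubarraywithkdistinctelements.py | smallest_subarray_with_k_distinct_elements
-- ===== SOURCE A (Python) =====
-- def smallest_subarray_with_k_distinct_elements(array:list[int],k:int)->int:
--
--     n=len(array)
--     first = -1
--     last=-1
--
--     minimum = float("inf")
--
--     for start in range(n):
--
--         seen=set()
--
--         for end in range(start,n):
--
--             seen.add(array[end])
--
--             if len(seen) == k:
--
--                 length = end-start+1
--
--                 if length < minimum:
--
--                     first=start
--                     last=end
--                     minimum =  length
--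
--                 break
--
--     if minimum == float("inf"):
--
--         return []
--
--     else:
--
--         return array[first:last+1]
-- ===== SOURCE B (Python) =====
-- def smallest_subarray_with_k_distinct_elements(array: list[int], k: int) -> int:
--     # Sliding-window two-pointer re-implementation: O(n) instead of O(n^2).
--     n = len(array)
--     counts = {}
--     distinct = 0
--     end = 0  # window under consideration is array[start:end]
--     best_start = -1
--     best_len = -1  # -1 means "no window found yet"
--     for start in range(n):
--         if end < start:  # window may never shrink below empty
--             end = start
--         while end < n and distinct < k:
--             c = counts.get(array[end], 0)
--             if c == 0:
--                 distinct += 1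
--             counts[array[end]] = c + 1
--             end += 1
--         if distinct == k:
--             length = end - start
--             if best_len == -1 or length < best_len:
--                 best_start = start
--                 best_len = length
--         if start < end:  # drop array[start] from the window
--             c = counts[array[start]] - 1
--             counts[array[start]] = c
--             if c == 0:
--                 distinct -= 1
--     if best_len == -1:
--         return []
--     return array[best_start:best_start + best_len]
-- ===== Notes on version B (the rewrite author's own statement) =====
-- stated objective: faster
-- what changed: Replaced the restart-from-scratch nested scan (a fresh set grown from every start index) by a single sliding-window two-pointer pass that maintains a count dictionary and distinct counter, so the right end never moves backwards.
import Mathlib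
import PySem

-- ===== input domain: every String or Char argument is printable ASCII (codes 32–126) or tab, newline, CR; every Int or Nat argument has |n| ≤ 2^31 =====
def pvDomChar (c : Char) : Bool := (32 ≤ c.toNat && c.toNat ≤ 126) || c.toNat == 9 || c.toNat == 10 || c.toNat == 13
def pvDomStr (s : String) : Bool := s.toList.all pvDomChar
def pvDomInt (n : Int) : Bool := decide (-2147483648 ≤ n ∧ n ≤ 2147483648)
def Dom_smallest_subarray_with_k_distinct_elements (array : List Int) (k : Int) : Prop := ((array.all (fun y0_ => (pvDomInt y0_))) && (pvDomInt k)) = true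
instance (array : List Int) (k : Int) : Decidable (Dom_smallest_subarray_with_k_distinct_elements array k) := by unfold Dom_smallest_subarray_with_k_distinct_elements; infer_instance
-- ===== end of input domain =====

-- B replaces A's quadratic restart-from-scratch scan by a linear sliding-window two-pointer pass
-- (objective: faster; same return value everywhere).

-- ===== PORT A =====
-- 'length < minimum' where minimum starts as float("inf"): none plays inf.
def pvLtInf (x : Int) : Option Int → Bool
  | none => true
  | some m => decide (x < m)

-- inner 'for end in range(start, n)' loop with its break
def pvInnerA (array : List Int) (k : Int) (start : Int) (ends : List Int)
    (seen : PySem.Set Int) (first last_ : Int) (minimum : Option Int) :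
    Int × Int × Option Int :=
  match ends with
  | [] => (first, last_, minimum)
  | e :: rest =>
    let seen' := PySem.Set.add seen (PySem.List.pyGetD array e 0)
    if PySem.Set.len seen' = k then
      (let length := e - start + 1
       if pvLtInf length minimum then (start, e, some length)
       else (first, last_, minimum))
    else pvInnerA array k start rest seen' first last_ minimum

-- body of the outer 'for start in range(n)' loop
def pvStepA (array : List Int) (k : Int) (st : Int × Int × Option Int) (start : Int) :
    Int × Int × Option Int :=
  pvInnerA array k start (PySem.List.pyRange start (array.length : Int) 1)
    PySem.Set.empty st.1 st.2.1 st.2.2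

def smallest_subarray_with_k_distinct_elements (array : List Int) (k : Int) : List Int :=
  let st := (PySem.List.pyRange 0 (array.length : Int) 1).foldl (pvStepA array k) (-1, -1, none)
  match st.2.2 with
  | none => []
  | some _ => PySem.List.slice array (some st.1) (some (st.2.1 + 1))

-- ===== PORT B =====
structure BState where
  counts : PySem.Dict Int Int
  distinct : Int
  endI : Int
  bestStart : Int
  bestLen : Int
deriving Repr, DecidableEq

-- the 'while end < n and distinct < k' loop (fuel n - end suffices: end grows by 1 each turn)
def pvWhileB (array : List Int) (k : Int) : Nat → Int → PySem.Dict Int Int → Int → Int × PySem.Dict Int Int × Int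
  | 0, endI, counts, distinct => (endI, counts, distinct)
  | fuel+1, endI, counts, distinct =>
    if endI < (array.length : Int) ∧ distinct < k then
      let x := PySem.List.pyGetD array endI 0
      let c := counts.getD x 0
      let distinct' := if c = 0 then distinct + 1 else distinct
      pvWhileB array k fuel (endI + 1) (counts.insert x (c + 1)) distinct'
    else (endI, counts, distinct)

-- body of the outer 'for start in range(n)' loop of Source B
def pvStepB (array : List Int) (k : Int) (st : BState) (start : Int) : BState :=
  let e0 : Int := if st.endI < start then start else st.endI
  let r := pvWhileB array k ((array.length : Int) - e0).toNat e0 st.counts st.distinct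
  let e1 := r.1
  let counts1 := r.2.1
  let d1 := r.2.2
  let best :=
    if d1 = k then
      (let length := e1 - start
       if st.bestLen = -1 ∨ length < st.bestLen then (start, length)
       else (st.bestStart, st.bestLen))
    else (st.bestStart, st.bestLen)
  if start < e1 then
    -- counts1[array[start]] is present: array[start] lies in the nonempty window, so no KeyError
    let x := PySem.List.pyGetD array start 0
    let c := counts1.getD x 0 - 1
    let counts2 := counts1.insert x c
    let d2 := if c = 0 then d1 - 1 else d1
    ⟨counts2, d2, e1, best.1, best.2⟩
  else
    ⟨counts1, d1, e1, best.1, best.2⟩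

def smallest_subarray_with_k_distinct_elements_alt (array : List Int) (k : Int) : List Int :=
  let st := (PySem.List.pyRange 0 (array.length : Int) 1).foldl (pvStepB array k) ⟨PySem.Dict.empty, 0, 0, -1, -1⟩
  if st.bestLen = -1 then []
  else PySem.List.slice array (some st.bestStart) (some (st.bestStart + st.bestLen))

-- ===== PRECONDITION & SPEC =====
def Spec_smallest_subarray_with_k_distinct_elements (array : List Int) (k : Int) (out : List Int) : Prop := out = smallest_subarray_with_k_distinct_elements_alt array k
instance (array : List Int) (k : Int) (out : List Int) : Decidable (Spec_smallest_subarray_with_k_distinct_elements array k out) := by unfold Spec_smallest_subarray_with_k_distinct_elements; infer_instance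

-- ===== CLAIM (what is proved, stated in full; the proofs are below) =====
def Claim_equal_smallest_subarray_with_k_distinct_elements : Prop := ∀ (array : List Int) (k : Int), Dom_smallest_subarray_with_k_distinct_elements array k → Spec_smallest_subarray_with_k_distinct_elements array k (smallest_subarray_with_k_distinct_elements array k)

-- ===== LEMMAS AND PROOFS =====

-- the window array[s:e] and its number of distinct values
def pvWin (a : List Int) (s e : Nat) : List Int := (a.take e).drop s
def pvDst (a : List Int) (s e : Nat) : Nat := (pvWin a s e).toFinset.card
-- the first window end e ≤ n whose distinct count is exactly k
def pvHit (a : List Int) (k : Int) (s : Nat) : Option Nat :=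
  (List.range (a.length + 1)).find? (fun e => decide ((pvDst a s e : Int) = k))
def pvEnd (a : List Int) (k : Int) (s : Nat) : Nat := (pvHit a k s).getD a.length
-- simulation relation between A's (first, last, minimum) and B's best fields
def pvRel (p : Int × Int × Option Int) (st : BState) : Prop :=
  (p.2.2 = none ∧ st.bestLen = -1) ∨
  (∃ L : Int, p.2.2 = some L ∧ st.bestLen = L ∧ st.bestStart = p.1 ∧ p.2.1 = p.1 + L - 1 ∧ 1 ≤ L)

theorem pvWin_empty (a : List Int) {s e : Nat} (h : e ≤ s) : pvWin a s e = [] := by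
  unfold pvWin
  exact List.drop_eq_nil_of_le (le_trans (List.length_take_le e a) h)

theorem pvWin_succ (a : List Int) {s e : Nat} (hs : s ≤ e) (he : e < a.length) :
    pvWin a s (e+1) = pvWin a s e ++ [a.getD e 0] := by
  unfold pvWin
  rw [List.take_succ]
  have h1 : a[e]? = some (a.getD e 0) := by
    rw [List.getElem?_eq_getElem he, List.getD_eq_getElem a 0 he]
  rw [h1]
  simp only [Option.toList_some]
  rw [List.drop_append_of_le_length]
  simp [List.length_take]; omega

theorem pvWin_stable (a : List Int) {s e : Nat} (he : a.length ≤ e) :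
    pvWin a s (e+1) = pvWin a s e := by
  unfold pvWin
  rw [List.take_of_length_le he, List.take_of_length_le (by omega)]

theorem pvWin_cons (a : List Int) {s e : Nat} (hs : s < e) (he : e ≤ a.length) :
    pvWin a s e = a.getD s 0 :: pvWin a (s+1) e := by
  unfold pvWin
  have hlen : s < (a.take e).length := by simp [List.length_take]; omega
  rw [List.drop_eq_getElem_cons hlen]
  congr 1
  rw [List.getElem_take, List.getD_eq_getElem a 0 (by omega)]

theorem pvCard_concat (w : List Int) (x : Int) :
    (w ++ [x]).toFinset.card = w.toFinset.card + (if x ∈ w then 0 else 1) := by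
  rw [List.toFinset_append]
  by_cases h : x ∈ w
  · simp [h, Finset.union_eq_left.mpr, Finset.singleton_subset_iff, List.mem_toFinset]
  · rw [Finset.union_comm]
    simp only [List.toFinset_cons, List.toFinset_nil, Finset.insert_union, Finset.empty_union]
    rw [Finset.card_insert_of_notMem (by simp [List.mem_toFinset, h])]
    simp [h]

theorem pvCard_cons (w : List Int) (x : Int) :
    (x :: w).toFinset.card = w.toFinset.card + (if x ∈ w then 0 else 1) := by
  simp only [List.toFinset_cons]
  by_cases h : x ∈ w
  · rw [Finset.card_insert_of_mem (by simp [List.mem_toFinset, h])]; simp [h]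
  · rw [Finset.card_insert_of_notMem (by simp [List.mem_toFinset, h])]; simp [h]

theorem pvDst_empty (a : List Int) {s e : Nat} (h : e ≤ s) : pvDst a s e = 0 := by
  unfold pvDst
  rw [pvWin_empty a h]; rfl

theorem pvDst_succ (a : List Int) {s e : Nat} (hs : s ≤ e) (he : e < a.length) :
    pvDst a s (e+1) = pvDst a s e + (if a.getD e 0 ∈ pvWin a s e then 0 else 1) := by
  unfold pvDst
  rw [pvWin_succ a hs he, pvCard_concat]

theorem pvDst_succ_le (a : List Int) (s e : Nat) : pvDst a s (e+1) ≤ pvDst a s e + 1 := by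
  rcases Nat.lt_or_ge e a.length with he | he
  · rcases Nat.lt_or_ge e s with hs | hs
    · rw [pvDst_empty a (show e + 1 ≤ s by omega)]
      omega
    · rw [pvDst_succ a hs he]
      split <;> omega
  · unfold pvDst
    rw [pvWin_stable a he]
    omega

theorem pvDst_anti (a : List Int) {s e : Nat} (he : e ≤ a.length) :
    pvDst a (s+1) e ≤ pvDst a s e := by
  rcases Nat.lt_or_ge (s+1) e with h | h
  · unfold pvDst
    conv_rhs => rw [pvWin_cons a (by omega) he]
    rw [pvCard_cons]
    split <;> omega
  · rw [pvDst_empty a h]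
    omega

theorem pvDst_pos (a : List Int) {s e : Nat} (h : 0 < pvDst a s e) : s < e := by
  by_contra hc
  rw [pvDst_empty a (by omega)] at h
  omega

theorem pvLen_add (S : PySem.Set Int) (x : Int) :
    (PySem.Set.add S x).length = if x ∈ S then S.length else S.length + 1 := by
  by_cases h : x ∈ S
  · have : PySem.Set.contains S x = true := by
      simp [PySem.Set.contains, h]
    simp [PySem.Set.add, h]
  · have : PySem.Set.contains S x = false := by
      simp [PySem.Set.contains, h]
    simp [PySem.Set.add, h]

theorem pvOfList_concat (w : List Int) (x : Int) :
    PySem.Set.ofList (w ++ [x]) = PySem.Set.add (PySem.Set.ofList w) x := by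
  rw [PySem.Set.ofList_eq_foldl, PySem.Set.ofList_eq_foldl, List.foldl_append]
  rfl

theorem pvLenOfList (w : List Int) : (PySem.Set.ofList w).length = w.toFinset.card := by
  induction w using List.reverseRecOn with
  | nil => rfl
  | append_singleton w x ih =>
    rw [pvOfList_concat, pvLen_add, pvCard_concat]
    by_cases h : x ∈ w
    · simp [PySem.Set.mem_ofList, h, ih]
    · simp [PySem.Set.mem_ofList, h, ih]

theorem pvFind?_range_some {P : Nat → Bool} {e m : Nat} (hem : e < m) (hP : P e = true)
    (hmin : ∀ e' < e, P e' = false) : (List.range m).find? P = some e := by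
  induction m with
  | zero => omega
  | succ m ih =>
    rw [List.range_succ, List.find?_append]
    rcases Nat.lt_or_ge e m with h | h
    · rw [ih h]; rfl
    · have he : e = m := by omega
      subst he
      have hnone : (List.range e).find? P = none := by
        rw [List.find?_eq_none]
        intro x hx
        simp only [List.mem_range] at hx
        simp [hmin x hx]
      rw [hnone]
      simp [hP]

theorem pvFind?_range_none {P : Nat → Bool} {m : Nat} (h : ∀ e < m, P e = false) :
    (List.range m).find? P = none := by
  rw [List.find?_eq_none]
  intro x hx
  simp only [List.mem_range] at hx
  simp [h x hx]

theorem pvHit_some (a : List Int) (k : Int) (s : Nat) {e : Nat} (h : pvHit a k s = some e) :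
    e ≤ a.length ∧ (pvDst a s e : Int) = k := by
  unfold pvHit at h
  have h1 := List.find?_some h
  have h2 := List.mem_of_find?_eq_some h
  simp only [List.mem_range] at h2
  simp only [decide_eq_true_eq] at h1
  exact ⟨by omega, h1⟩

theorem pvHit_none (a : List Int) (k : Int) (s : Nat) (h : pvHit a k s = none) :
    ∀ e ≤ a.length, (pvDst a s e : Int) ≠ k := by
  intro e he
  unfold pvHit at h
  rw [List.find?_eq_none] at h
  have := h e (by simp; omega)
  simpa using this

-- A's inner loop finds the first hit from e0 on
theorem pvInnerA_spec (a : List Int) (k : Int) (hk : 1 ≤ k) :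
    ∀ (m : Nat) (s e0 : Nat), a.length - e0 = m → s ≤ e0 → e0 ≤ a.length →
    (∀ e' ≤ e0, (pvDst a s e' : Int) < k) →
    ∀ (f l : Int) (mo : Option Int),
    pvInnerA a k (s : Int) (PySem.List.pyRange (e0 : Int) (a.length : Int) 1)
        (PySem.Set.ofList (pvWin a s e0)) f l mo =
      (match pvHit a k s with
       | none => (f, l, mo)
       | some e => if pvLtInf ((e : Int) - (s : Int)) mo
           then ((s : Int), (e : Int) - 1, some ((e : Int) - (s : Int)))
           else (f, l, mo)) := by
  intro m
  induction m with
  | zero =>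
    intro s e0 hm hs he hno f l mo
    have he0 : e0 = a.length := by omega
    subst he0
    rw [PySem.List.pyRange_one_eq_nil (le_refl _)]
    have hhit : pvHit a k s = none := by
      unfold pvHit
      apply pvFind?_range_none
      intro e he'
      simp only [decide_eq_false_iff_not]
      have := hno e (by omega)
      omega
    rw [hhit]
    rfl
  | succ m ih =>
    intro s e0 hm hs he hno f l mo
    have hlt : e0 < a.length := by omega
    rw [PySem.List.pyRange_one_cons (by exact_mod_cast hlt)]
    have hx : PySem.List.pyGetD a (e0 : Int) 0 = a.getD e0 0 := PySem.List.pyGetD_natCast a e0 0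
    have hseen : PySem.Set.add (PySem.Set.ofList (pvWin a s e0)) (a.getD e0 0)
        = PySem.Set.ofList (pvWin a s (e0+1)) := by
      rw [← pvOfList_concat, ← pvWin_succ a hs hlt]
    have hlen : PySem.Set.len (PySem.Set.ofList (pvWin a s (e0+1))) = (pvDst a s (e0+1) : Int) := by
      unfold PySem.Set.len pvDst
      rw [pvLenOfList]
    simp only [pvInnerA, hx, hseen, hlen]
    by_cases hhit : (pvDst a s (e0+1) : Int) = k
    · have hsome : pvHit a k s = some (e0+1) := by
        unfold pvHit
        apply pvFind?_range_some (by omega)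
        · simp [hhit]
        · intro e' he'
          simp only [decide_eq_false_iff_not]
          have := hno e' (by omega)
          omega
      rw [hsome, if_pos hhit]
      show (if pvLtInf ((e0 : Int) - (s : Int) + 1) mo = true
              then ((s : Int), (e0 : Int), some ((e0 : Int) - (s : Int) + 1)) else (f, l, mo))
          = (if pvLtInf (((e0 + 1 : Nat) : Int) - (s : Int)) mo = true
              then ((s : Int), ((e0 + 1 : Nat) : Int) - 1, some (((e0 + 1 : Nat) : Int) - (s : Int)))
              else (f, l, mo))
      have h1 : ((e0 + 1 : Nat) : Int) - (s : Int) = (e0 : Int) - s + 1 := by push_cast; ring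
      have h2 : ((e0 + 1 : Nat) : Int) - 1 = (e0 : Int) := by push_cast; ring
      rw [h1, h2]
    · rw [if_neg hhit]
      have hcast : ((e0 : Int) + 1) = ((e0 + 1 : Nat) : Int) := by push_cast; ring
      rw [hcast]
      refine ih s (e0+1) (by omega) (by omega) (by omega) ?_ f l mo
      intro e' he'
      rcases Nat.lt_or_ge e' (e0+1) with h | h
      · exact hno e' (by omega)
      · have he'' : e' = e0 + 1 := by omega
        subst he''
        have hle := pvDst_succ_le a s e0
        have hle' : (pvDst a s (e0+1) : Int) ≤ (pvDst a s e0 : Int) + 1 := by exact_mod_cast hle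
        have := hno e0 (le_refl _)
        omega

-- B's while loop runs exactly to pvEnd
theorem pvWhileB_spec (a : List Int) (k : Int) (hk : 1 ≤ k) :
    ∀ (m : Nat) (s e0 : Nat), a.length - e0 = m → s ≤ e0 → e0 ≤ a.length →
    ∀ (counts : PySem.Dict Int Int),
    (∀ x, counts.getD x 0 = ((pvWin a s e0).count x : Int)) →
    (∀ e' < e0, (pvDst a s e' : Int) < k) →
    ∃ C, pvWhileB a k m (e0 : Int) counts ((pvDst a s e0 : Int)) =
        ((pvEnd a k s : Int), C, (pvDst a s (pvEnd a k s) : Int)) ∧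
      (∀ x, C.getD x 0 = ((pvWin a s (pvEnd a k s)).count x : Int)) ∧
      e0 ≤ pvEnd a k s ∧ pvEnd a k s ≤ a.length ∧
      (∀ e' < pvEnd a k s, (pvDst a s e' : Int) < k) := by
  intro m
  induction m with
  | zero =>
    intro s e0 hm hs he counts hc hno
    have he0 : e0 = a.length := by omega
    subst he0
    have hEnd : pvEnd a k s = a.length := by
      cases hh : pvHit a k s with
      | none => unfold pvEnd; rw [hh]; rfl
      | some e =>
        obtain ⟨hle, hke⟩ := pvHit_some a k s hh
        have heq : e = a.length := by
          by_contra hne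
          have := hno e (by omega)
          omega
        unfold pvEnd
        rw [hh, heq]
        rfl
    refine ⟨counts, ?_, ?_, ?_, ?_, ?_⟩
    · rw [hEnd]
      rfl
    · rw [hEnd]; exact hc
    · rw [hEnd]
    · rw [hEnd]
    · rw [hEnd]; exact hno
  | succ m ih =>
    intro s e0 hm hs he counts hc hno
    have hlt : e0 < a.length := by omega
    by_cases hdk : (pvDst a s e0 : Int) < k
    · simp only [pvWhileB]
      rw [if_pos ⟨by exact_mod_cast hlt, hdk⟩]
      have hx : PySem.List.pyGetD a (e0 : Int) 0 = a.getD e0 0 := PySem.List.pyGetD_natCast a e0 0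
      have hcx := hc (a.getD e0 0)
      have hczero : (counts.getD (a.getD e0 0) 0 = 0) ↔ a.getD e0 0 ∉ pvWin a s e0 := by
        rw [hcx]
        constructor
        · intro h hmem
          have : 0 < (pvWin a s e0).count (a.getD e0 0) := List.count_pos_iff.mpr hmem
          omega
        · intro h
          rw [List.count_eq_zero.mpr h]
          rfl
      have hwin := pvWin_succ a hs hlt
      have hdsucc := pvDst_succ a hs hlt
      have hdist : (if counts.getD (a.getD e0 0) 0 = 0 then (pvDst a s e0 : Int) + 1 else (pvDst a s e0 : Int))
          = (pvDst a s (e0+1) : Int) := by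
        by_cases hmem : a.getD e0 0 ∈ pvWin a s e0
        · rw [if_neg (fun h => (hczero.mp h) hmem), hdsucc, if_pos hmem]
          norm_num
        · rw [if_pos (hczero.mpr hmem), hdsucc, if_neg hmem]
          push_cast
          ring
      have hcounts' : ∀ y, (counts.insert (a.getD e0 0) (counts.getD (a.getD e0 0) 0 + 1)).getD y 0
          = ((pvWin a s (e0+1)).count y : Int) := by
        intro y
        rw [PySem.Dict.getD_insert, hwin]
        by_cases hy : y = a.getD e0 0
        · subst hy
          rw [if_pos rfl, hcx]
          rw [List.count_append]
          simp
        · rw [if_neg hy, hc y, List.count_append]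
          have hone : [a.getD e0 0].count y = 0 := by
            simp [List.count_singleton]
            intro hcast
            exact hy hcast.symm
          rw [hone]
          simp
      have hcast : ((e0 : Int) + 1) = ((e0 + 1 : Nat) : Int) := by push_cast; ring
      rw [hx, hdist, hcast]
      have hno' : ∀ e' < e0 + 1, (pvDst a s e' : Int) < k := by
        intro e' he'
        rcases Nat.lt_or_ge e' e0 with h | h
        · exact hno e' h
        · have he'' : e' = e0 := by omega
          subst he''
          exact hdk
      obtain ⟨C, h1, h2, h3, h4, h5⟩ := ih s (e0+1) (by omega) (by omega) (by omega) _ hcounts' hno'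
      exact ⟨C, h1, h2, by omega, h4, h5⟩
    · have heq : (pvDst a s e0 : Int) = k := by
        cases e0 with
        | zero =>
          exfalso
          have hs0 : s = 0 := by omega
          subst hs0
          have h0 : pvDst a 0 0 = 0 := pvDst_empty a (le_refl 0)
          rw [h0] at hdk
          exact hdk (by exact_mod_cast hk)
        | succ e0' =>
          have h1 := hno e0' (by omega)
          have h2 := pvDst_succ_le a s e0'
          have h2' : (pvDst a s (e0'+1) : Int) ≤ (pvDst a s e0' : Int) + 1 := by exact_mod_cast h2
          omega
      have hsome : pvHit a k s = some e0 := by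
        unfold pvHit
        apply pvFind?_range_some (by omega)
        · simp [heq]
        · intro e' he'
          simp only [decide_eq_false_iff_not]
          have := hno e' he'
          omega
      have hEnd : pvEnd a k s = e0 := by unfold pvEnd; rw [hsome]; rfl
      simp only [pvWhileB]
      rw [if_neg (by intro hcon; exact hdk hcon.2)]
      refine ⟨counts, ?_, ?_, ?_, ?_, ?_⟩
      · rw [hEnd]
      · rw [hEnd]; exact hc
      · rw [hEnd]
      · rw [hEnd]
        omega
      · rw [hEnd]; exact hno

-- dropping array[start] from the window
theorem pvRemove (a : List Int) {s E : Nat} (hsE : s < E) (hEn : E ≤ a.length)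
    (C : PySem.Dict Int Int) (hC : ∀ y, C.getD y 0 = ((pvWin a s E).count y : Int)) :
    (∀ y, (C.insert (a.getD s 0) (C.getD (a.getD s 0) 0 - 1)).getD y 0
        = ((pvWin a (s+1) E).count y : Int))
    ∧ ((if C.getD (a.getD s 0) 0 - 1 = 0 then (pvDst a s E : Int) - 1 else (pvDst a s E : Int))
        = (pvDst a (s+1) E : Int)) := by
  have hwinc := pvWin_cons a hsE hEn
  have hcx : C.getD (a.getD s 0) 0 = ((pvWin a (s+1) E).count (a.getD s 0) : Int) + 1 := by
    rw [hC, hwinc, List.count_cons_self]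
    push_cast
    ring
  constructor
  · intro y
    rw [PySem.Dict.getD_insert]
    by_cases hy : y = a.getD s 0
    · subst hy
      rw [if_pos rfl, hcx]
      ring
    · rw [if_neg hy, hC y, hwinc, List.count_cons]
      have hbeq : (a.getD s 0 == y) = false := beq_eq_false_iff_ne.mpr (fun h => hy h.symm)
      rw [hbeq]
      push_cast
      ring
  · have hdst : (pvDst a s E : Int)
        = (pvDst a (s+1) E : Int) + (if a.getD s 0 ∈ pvWin a (s+1) E then 0 else 1) := by
      unfold pvDst
      rw [hwinc, pvCard_cons]
      by_cases hmem : a.getD s 0 ∈ pvWin a (s+1) E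
      · simp [hmem]
      · simp [hmem]
    by_cases hmem : a.getD s 0 ∈ pvWin a (s+1) E
    · have hcnt : 0 < (pvWin a (s+1) E).count (a.getD s 0) := List.count_pos_iff.mpr hmem
      rw [if_neg (by rw [hcx]; intro hcon; omega), hdst, if_pos hmem]
      ring
    · have hcnt : (pvWin a (s+1) E).count (a.getD s 0) = 0 := List.count_eq_zero.mpr hmem
      rw [if_pos (by rw [hcx, hcnt]; ring), hdst, if_neg hmem]
      push_cast
      ring

-- the joint outer induction: both folds stay pvRel-related
theorem pvOuter_sim (a : List Int) (k : Int) (hk : 1 ≤ k) :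
    ∀ (m : Nat) (s : Nat), a.length - s = m → s ≤ a.length →
    ∀ (p : Int × Int × Option Int) (st : BState) (e : Nat),
    pvRel p st → st.endI = (e : Int) → s ≤ e → e ≤ a.length →
    (∀ x, st.counts.getD x 0 = ((pvWin a s e).count x : Int)) →
    st.distinct = (pvDst a s e : Int) →
    (∀ e' < e, (pvDst a s e' : Int) < k) →
    pvRel ((PySem.List.pyRange (s : Int) (a.length : Int) 1).foldl (pvStepA a k) p)
          ((PySem.List.pyRange (s : Int) (a.length : Int) 1).foldl (pvStepB a k) st) := by
  intro m
  induction m with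
  | zero =>
    intro s hm hsn p st e hrel hend hse hen hc hd hno
    have hs : s = a.length := by omega
    subst hs
    rw [PySem.List.pyRange_one_eq_nil (le_refl _)]
    simpa using hrel
  | succ m ih =>
    intro s hm hsn p st e hrel hend hse hen hc hd hno
    have hlt : s < a.length := by omega
    rw [PySem.List.pyRange_one_cons (by exact_mod_cast hlt), List.foldl_cons, List.foldl_cons]
    -- A's step via the inner-loop characterisation
    have hstepA : pvStepA a k p (s : Int) =
        (match pvHit a k s with
         | none => (p.1, p.2.1, p.2.2)
         | some e' => if pvLtInf ((e' : Int) - (s : Int)) p.2.2 = true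
             then ((s : Int), (e' : Int) - 1, some ((e' : Int) - (s : Int)))
             else (p.1, p.2.1, p.2.2)) := by
      unfold pvStepA
      have hseed : (PySem.Set.empty : PySem.Set Int) = PySem.Set.ofList (pvWin a s s) := by
        rw [pvWin_empty a (le_refl s)]
        rfl
      rw [hseed, pvInnerA_spec a k hk (a.length - s) s s rfl (le_refl s) (by omega)
        (fun e' he' => by rw [pvDst_empty a he']; push_cast; omega) p.1 p.2.1 p.2.2]
    -- B's step: the while loop runs to pvEnd, then the record and removal steps
    obtain ⟨C, hwb, hC, hge, hle2, hnoP⟩ :=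
      pvWhileB_spec a k hk (a.length - e) s e rfl hse hen st.counts hc hno
    have hsE : s < pvEnd a k s := by
      cases hh : pvHit a k s with
      | some e'' =>
        obtain ⟨h1, h2⟩ := pvHit_some a k s hh
        have hE' : pvEnd a k s = e'' := by unfold pvEnd; rw [hh]; rfl
        have hpos : 0 < pvDst a s e'' := by omega
        rw [hE']
        exact pvDst_pos a hpos
      | none =>
        have hE' : pvEnd a k s = a.length := by unfold pvEnd; rw [hh]; rfl
        omega
    have he0 : (if st.endI < (s : Int) then (s : Int) else st.endI) = (e : Int) := by
      rw [hend, if_neg (by exact_mod_cast Nat.not_lt.mpr hse)]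
    have hfuel : (((a.length : Int) - (e : Int)).toNat) = a.length - e := by omega
    obtain ⟨hc', hd'⟩ := pvRemove a hsE hle2 C hC
    have hstepB : pvStepB a k st (s : Int) =
        ⟨C.insert (a.getD s 0) (C.getD (a.getD s 0) 0 - 1),
         (if C.getD (a.getD s 0) 0 - 1 = 0 then (pvDst a s (pvEnd a k s) : Int) - 1
            else (pvDst a s (pvEnd a k s) : Int)),
         ((pvEnd a k s : Nat) : Int),
         (if (pvDst a s (pvEnd a k s) : Int) = k then
            (if st.bestLen = -1 ∨ ((pvEnd a k s : Nat) : Int) - (s : Int) < st.bestLen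
               then ((s : Int), ((pvEnd a k s : Nat) : Int) - (s : Int))
               else (st.bestStart, st.bestLen))
          else (st.bestStart, st.bestLen)).1,
         (if (pvDst a s (pvEnd a k s) : Int) = k then
            (if st.bestLen = -1 ∨ ((pvEnd a k s : Nat) : Int) - (s : Int) < st.bestLen
               then ((s : Int), ((pvEnd a k s : Nat) : Int) - (s : Int))
               else (st.bestStart, st.bestLen))
          else (st.bestStart, st.bestLen)).2⟩ := by
      unfold pvStepB
      simp only [he0, hfuel, hd, hwb]
      rw [if_pos (show (s : Int) < ((pvEnd a k s : Nat) : Int) by exact_mod_cast hsE)]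
      simp only [PySem.List.pyGetD_natCast]
    have hcast : (s : Int) + 1 = ((s + 1 : Nat) : Int) := by push_cast; ring
    rw [hstepB, hcast]
    have hno' : ∀ e' < pvEnd a k s, (pvDst a (s+1) e' : Int) < k := by
      intro e' he'
      have h1 := hnoP e' he'
      have h2 := pvDst_anti a (s := s) (e := e') (by omega)
      have h2' : (pvDst a (s+1) e' : Int) ≤ (pvDst a s e' : Int) := by exact_mod_cast h2
      omega
    cases hh : pvHit a k s with
    | none =>
      have hE' : pvEnd a k s = a.length := by unfold pvEnd; rw [hh]; rfl
      have hDk : (pvDst a s (pvEnd a k s) : Int) ≠ k := by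
        rw [hE']
        exact pvHit_none a k s hh a.length (le_refl _)
      have hA : pvStepA a k p (s : Int) = p := by rw [hstepA, hh]
      rw [hA, if_neg hDk]
      refine ih (s+1) (by omega) (by omega) _ _ (pvEnd a k s) ?_ ?_ ?_ ?_ ?_ ?_ ?_
      · exact hrel
      · rfl
      · omega
      · exact hle2
      · exact hc'
      · exact hd'
      · exact hno'
    | some e' =>
      have hE' : pvEnd a k s = e' := by unfold pvEnd; rw [hh]; rfl
      obtain ⟨hEn', hDk0⟩ := pvHit_some a k s hh
      rw [hE'] at hsE hle2 hc' hd' hno' ⊢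
      have hA : pvStepA a k p (s : Int) =
          (if pvLtInf ((e' : Int) - (s : Int)) p.2.2 = true
             then ((s : Int), (e' : Int) - 1, some ((e' : Int) - (s : Int)))
             else (p.1, p.2.1, p.2.2)) := by rw [hstepA, hh]
      rw [hA, if_pos hDk0]
      have hLpos : 1 ≤ (e' : Int) - (s : Int) := by omega
      rcases hrel with ⟨hmo, hbl⟩ | ⟨L, hmo, hbl, hbs, hlast, hL⟩
      · -- no previous best: both record
        have hcondA : pvLtInf ((e' : Int) - (s : Int)) p.2.2 = true := by
          rw [hmo]
          rfl
        have hrec : (if st.bestLen = -1 ∨ (e' : Int) - (s : Int) < st.bestLen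
            then ((s : Int), (e' : Int) - (s : Int)) else (st.bestStart, st.bestLen))
            = ((s : Int), (e' : Int) - (s : Int)) := if_pos (Or.inl hbl)
        rw [hcondA, hrec, if_pos rfl]
        refine ih (s+1) (by omega) (by omega) _ _ e' ?_ ?_ ?_ ?_ ?_ ?_ ?_
        · right
          exact ⟨(e' : Int) - (s : Int), rfl, rfl, rfl,
            by show (e' : Int) - 1 = (s : Int) + ((e' : Int) - (s : Int)) - 1; ring, hLpos⟩
        · rfl
        · omega
        · exact hle2
        · exact hc'
        · exact hd'
        · exact hno'
      · -- a previous best exists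
        have hblne : ¬ st.bestLen = -1 := by omega
        by_cases hx : (e' : Int) - (s : Int) < L
        · have hcondA : pvLtInf ((e' : Int) - (s : Int)) p.2.2 = true := by
            rw [hmo]
            simp [pvLtInf, hx]
          have hrec : (if st.bestLen = -1 ∨ (e' : Int) - (s : Int) < st.bestLen
              then ((s : Int), (e' : Int) - (s : Int)) else (st.bestStart, st.bestLen))
              = ((s : Int), (e' : Int) - (s : Int)) := if_pos (Or.inr (by rw [hbl]; exact hx))
          rw [hcondA, hrec, if_pos rfl]
          refine ih (s+1) (by omega) (by omega) _ _ e' ?_ ?_ ?_ ?_ ?_ ?_ ?_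
          · right
            exact ⟨(e' : Int) - (s : Int), rfl, rfl, rfl,
            by show (e' : Int) - 1 = (s : Int) + ((e' : Int) - (s : Int)) - 1; ring, hLpos⟩
          · rfl
          · omega
          · exact hle2
          · exact hc'
          · exact hd'
          · exact hno'
        · have hcondA : pvLtInf ((e' : Int) - (s : Int)) p.2.2 = false := by
            rw [hmo]
            simp [pvLtInf, hx]
          have hrec : (if st.bestLen = -1 ∨ (e' : Int) - (s : Int) < st.bestLen
              then ((s : Int), (e' : Int) - (s : Int)) else (st.bestStart, st.bestLen))
              = (st.bestStart, st.bestLen) := if_neg (by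
                push_neg
                exact ⟨hblne, by rw [hbl]; exact not_lt.mp hx⟩)
          rw [hcondA, hrec]
          simp only [Bool.false_eq_true, if_false]
          refine ih (s+1) (by omega) (by omega) _ _ e' ?_ ?_ ?_ ?_ ?_ ?_ ?_
          · right
            exact ⟨L, hmo, hbl, hbs, hlast, hL⟩
          · rfl
          · omega
          · exact hle2
          · exact hc'
          · exact hd'
          · exact hno'

-- k ≤ 0: A never records (a set just added to is nonempty)
theorem pvInnerA_noop (a : List Int) (k : Int) (hk : k ≤ 0) :
    ∀ (ends : List Int) (s : Int) (seen : PySem.Set Int) (f l : Int) (mo : Option Int),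
    pvInnerA a k s ends seen f l mo = (f, l, mo) := by
  intro ends
  induction ends with
  | nil => intro s seen f l mo; rfl
  | cons e rest ih =>
    intro s seen f l mo
    simp only [pvInnerA]
    rw [if_neg]
    · exact ih s _ f l mo
    · have h1 : 1 ≤ (PySem.Set.add seen (PySem.List.pyGetD a e 0)).length := by
        rw [pvLen_add]
        split
        · exact List.length_pos_of_mem (by assumption)
        · omega
      unfold PySem.Set.len
      intro hcon
      omega

theorem pvFoldA_noop (a : List Int) (k : Int) (hk : k ≤ 0) (xs : List Int)
    (p : Int × Int × Option Int) : xs.foldl (pvStepA a k) p = p := by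
  induction xs generalizing p with
  | nil => rfl
  | cons x xs ih =>
    rw [List.foldl_cons]
    have hstep : pvStepA a k p x = p := by
      unfold pvStepA
      rw [pvInnerA_noop a k hk]
    rw [hstep]
    exact ih p

theorem pvWhileB_stuck (a : List Int) (k : Int) (hk : k ≤ 0) (fuel : Nat) (e0 : Int)
    (counts : PySem.Dict Int Int) : pvWhileB a k fuel e0 counts 0 = (e0, counts, 0) := by
  cases fuel with
  | zero => rfl
  | succ fuel =>
    simp only [pvWhileB]
    rw [if_neg]
    intro hcon
    omega

theorem pvStepB_small (a : List Int) (k : Int) (hk : k ≤ 0) (st : BState) (s : Int)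
    (h3 : st.endI ≤ s) (h2 : st.distinct = 0) :
    pvStepB a k st s =
      ⟨st.counts, 0, s,
       (if (0 : Int) = k then
          (if st.bestLen = -1 ∨ s - s < st.bestLen then (s, s - s) else (st.bestStart, st.bestLen))
        else (st.bestStart, st.bestLen)).1,
       (if (0 : Int) = k then
          (if st.bestLen = -1 ∨ s - s < st.bestLen then (s, s - s) else (st.bestStart, st.bestLen))
        else (st.bestStart, st.bestLen)).2⟩ := by
  have he0 : (if st.endI < s then s else st.endI) = s := by split <;> omega
  unfold pvStepB
  simp only [he0, h2]
  rw [pvWhileB_stuck a k hk]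
  rw [if_neg (lt_irrefl s)]


theorem pvFoldB_neg (a : List Int) (k : Int) (hk : k < 0) :
    ∀ (m : Nat) (s : Nat), a.length - s = m →
    ∀ (st : BState), st.endI ≤ (s : Int) → st.distinct = 0 → st.bestLen = -1 →
    ((PySem.List.pyRange (s : Int) (a.length : Int) 1).foldl (pvStepB a k) st).bestLen = -1 := by
  intro m
  induction m with
  | zero =>
    intro s hm st h3 h2 hbl
    rw [PySem.List.pyRange_one_eq_nil (by exact_mod_cast Nat.le_of_sub_eq_zero hm)]
    exact hbl
  | succ m ih =>
    intro s hm st h3 h2 hbl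
    have hlt : s < a.length := by omega
    rw [PySem.List.pyRange_one_cons (by exact_mod_cast hlt), List.foldl_cons]
    rw [pvStepB_small a k (le_of_lt hk) st (s : Int) h3 h2]
    rw [if_neg (by omega)]
    have hcast : (s : Int) + 1 = ((s + 1 : Nat) : Int) := by push_cast; ring
    rw [hcast]
    exact ih (s+1) (by omega) _ (by push_cast; omega) rfl hbl

theorem pvFoldB_zero (a : List Int) (hk : (0 : Int) = 0) :
    ∀ (m : Nat) (s : Nat), a.length - s = m →
    ∀ (st : BState), st.endI ≤ (s : Int) → st.distinct = 0 → st.bestStart = 0 → st.bestLen = 0 →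
    (((PySem.List.pyRange (s : Int) (a.length : Int) 1).foldl (pvStepB (a) 0) st).bestStart = 0 ∧
     ((PySem.List.pyRange (s : Int) (a.length : Int) 1).foldl (pvStepB (a) 0) st).bestLen = 0) := by
  intro m
  induction m with
  | zero =>
    intro s hm st h3 h2 hbs hbl
    rw [PySem.List.pyRange_one_eq_nil (by exact_mod_cast Nat.le_of_sub_eq_zero hm)]
    exact ⟨hbs, hbl⟩
  | succ m ih =>
    intro s hm st h3 h2 hbs hbl
    have hlt : s < a.length := by omega
    rw [PySem.List.pyRange_one_cons (by exact_mod_cast hlt), List.foldl_cons]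
    rw [pvStepB_small a 0 (le_refl 0) st (s : Int) h3 h2]
    rw [if_pos rfl, if_neg (by omega)]
    have hcast : (s : Int) + 1 = ((s + 1 : Nat) : Int) := by push_cast; ring
    rw [hcast]
    exact ih (s+1) (by omega) _ (by push_cast; omega) rfl hbs hbl

-- ===== VERDICT (by name: the statement is the Claim_ definition above) =====
theorem smallest_subarray_with_k_distinct_elements_spec : Claim_equal_smallest_subarray_with_k_distinct_elements := by
  intro array k _hdom
  unfold Spec_smallest_subarray_with_k_distinct_elements
  rcases Decidable.em (k ≤ 0) with hk | hk
  · -- k ≤ 0: both return []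
    simp only [smallest_subarray_with_k_distinct_elements,
      smallest_subarray_with_k_distinct_elements_alt]
    rw [pvFoldA_noop array k hk]
    rcases hk.lt_or_eq with hk' | hk'
    · -- k < 0: B never records
      have hB := pvFoldB_neg array k hk' array.length 0 (by omega)
        ⟨PySem.Dict.empty, 0, 0, -1, -1⟩ (by norm_num) rfl rfl
      simp only [Nat.cast_zero] at hB
      rw [if_pos hB]
    · -- k = 0: B records the empty window at start 0 and returns array[0:0] = []
      subst hk'
      rcases Nat.eq_zero_or_pos array.length with h0 | h0
      · rw [PySem.List.pyRange_one_eq_nil (by omega)]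
        rfl
      · rw [PySem.List.pyRange_one_cons (by exact_mod_cast h0), List.foldl_cons]
        have hstep := pvStepB_small array 0 (le_refl 0) ⟨PySem.Dict.empty, 0, 0, -1, -1⟩ 0
          (le_refl 0) rfl
        have hstep' : pvStepB array 0 ⟨PySem.Dict.empty, 0, 0, -1, -1⟩ 0
            = ⟨PySem.Dict.empty, 0, 0, 0, 0⟩ := by
          rw [hstep]
          norm_num
        rw [hstep']
        have hone : (0 : Int) + 1 = ((1 : Nat) : Int) := by norm_num
        rw [hone]
        have hB := pvFoldB_zero array rfl (array.length - 1) 1 (by omega)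
          ⟨PySem.Dict.empty, 0, 0, 0, 0⟩ (by norm_num) rfl rfl rfl
        obtain ⟨hbs, hbl⟩ := hB
        rw [if_neg (by rw [hbl]; norm_num), hbs, hbl]
        show ([] : List Int) = PySem.List.slice array (some 0) (some (0 + 0))
        norm_num [PySem.List.slice_toNat]
  · -- 1 ≤ k: the sliding-window simulation
    have hk1 : 1 ≤ k := by omega
    simp only [smallest_subarray_with_k_distinct_elements,
      smallest_subarray_with_k_distinct_elements_alt]
    have hsim := pvOuter_sim array k hk1 array.length 0 (by omega) (by omega)
      (-1, -1, none) ⟨PySem.Dict.empty, 0, 0, -1, -1⟩ 0 (Or.inl ⟨rfl, rfl⟩) rfl (le_refl 0)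
      (by omega)
      (by
        intro x
        rw [pvWin_empty array (le_refl 0)]
        simp [PySem.Dict.getD_empty])
      (by
        rw [pvDst_empty array (le_refl 0)]
        rfl)
      (by
        intro e' he'
        exact absurd he' (Nat.not_lt_zero e'))
    simp only [Nat.cast_zero] at hsim
    rcases hsim with ⟨hmo, hbl⟩ | ⟨L, hmo, hbl, hbs, hlast, hL⟩
    · rw [if_pos hbl, hmo]
    · rw [if_neg (by rw [hbl]; omega), hmo]
      rw [hbs, hbl, hlast]
      have harith : (List.foldl (pvStepA array k) (-1, -1, none)
          (PySem.List.pyRange 0 (array.length : Int) 1)).1 + L - 1 + 1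
          = (List.foldl (pvStepA array k) (-1, -1, none)
          (PySem.List.pyRange 0 (array.length : Int) 1)).1 + L := by ring
      rw [harith]
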